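-- pv_equiv track=rewrite | github.com/1-Liam/DENSN-Atlas | fixtures/session_epoch/target/validator.py | validate_trace
-- ===== SOURCE A (Python) =====
-- def validate_trace(events):
--     """
--     Buggy reference implementation: it remembers only that START_SESSION happened once.
--     It does not model the hidden epoch-live state correctly after FINISH_SESSION.
--     """
--     saw_start = False
--     for event in events:
--         if event == "START_SESSION":
--             saw_start = True
--         elif event == "FINISH_SESSION":
--             if not saw_start:
--                 return False
--         elif event == "UPDATE" and not saw_start:
--             return False
--         else:
--             return False
--     return True
-- ===== SOURCE B (Python) =====
-- def validate_trace(events):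
--     """Static characterization: a trace is valid iff it is empty, or it starts
--     with START_SESSION and contains only START_SESSION/FINISH_SESSION events."""
--     evs = list(events)
--     if not evs:
--         return True
--     return evs[0] == "START_SESSION" and all(
--         e in ("START_SESSION", "FINISH_SESSION") for e in evs
--     )
-- ===== Notes on version B (the rewrite author's own statement) =====
-- stated objective: simpler
-- what changed: Replaces the running saw_start flag simulation with two static property checks: first event is START_SESSION and all events are in {START_SESSION, FINISH_SESSION}.
import Mathlib
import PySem

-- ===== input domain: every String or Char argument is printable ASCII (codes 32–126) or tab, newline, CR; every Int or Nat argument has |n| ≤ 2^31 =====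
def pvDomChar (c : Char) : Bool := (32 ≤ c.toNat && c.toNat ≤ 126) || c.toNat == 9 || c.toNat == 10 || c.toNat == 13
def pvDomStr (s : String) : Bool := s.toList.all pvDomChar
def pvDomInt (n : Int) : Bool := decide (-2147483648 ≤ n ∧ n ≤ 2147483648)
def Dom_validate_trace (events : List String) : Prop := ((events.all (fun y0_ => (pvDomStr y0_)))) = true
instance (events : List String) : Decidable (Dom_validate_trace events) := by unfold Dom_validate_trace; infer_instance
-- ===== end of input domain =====

-- B replaces A's running saw_start flag with two static checks (first event / allowed alphabet); same O(n) cost, simpler.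

-- ===== PORT A =====
-- literal port of A's for-loop with early returns, threading the saw_start flag
def validateLoopA : List String → Bool → Bool
  | [], _ => true
  | e :: rest, saw =>
    if e = "START_SESSION" then validateLoopA rest true
    else if e = "FINISH_SESSION" then
      (if !saw then false else validateLoopA rest saw)
    else if e = "UPDATE" && !saw then false
    else false

def validate_trace (events : List String) : Bool :=
  validateLoopA events false

-- ===== PORT B =====
def validate_trace_alt (events : List String) : Bool :=
  match events with
  | [] => true
  | e :: _ =>
    decide (e = "START_SESSION") &&
      events.all (fun x => decide (x = "START_SESSION") || decide (x = "FINISH_SESSION"))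

-- ===== PRECONDITION & SPEC =====
def Spec_validate_trace (events : List String) (out : Bool) : Prop := out = validate_trace_alt events
instance (events : List String) (out : Bool) : Decidable (Spec_validate_trace events out) := by unfold Spec_validate_trace; infer_instance

-- ===== CLAIM (what is proved, stated in full; the proofs are below) =====
def Claim_equal_validate_trace : Prop := ∀ (events : List String), Dom_validate_trace events → Spec_validate_trace events (validate_trace events)

-- ===== LEMMAS AND PROOFS =====

-- Once saw_start is true it never changes: the loop just checks the alphabet.
theorem validateLoopA_true (events : List String) :
    validateLoopA events true =
      events.all (fun x => decide (x = "START_SESSION") || decide (x = "FINISH_SESSION")) := by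
  induction events with
  | nil => rfl
  | cons e rest ih =>
    simp only [validateLoopA, List.all_cons]
    by_cases h1 : e = "START_SESSION"
    · simp [h1, ih]
    · by_cases h2 : e = "FINISH_SESSION" <;> simp [h1, h2, ih]

-- ===== VERDICT (by name: the statement is the Claim_ definition above) =====
theorem validate_trace_spec : Claim_equal_validate_trace := by
  intro events _
  unfold Spec_validate_trace validate_trace validate_trace_alt
  cases events with
  | nil => rfl
  | cons e rest =>
    by_cases h1 : e = "START_SESSION"
    · simp [validateLoopA, h1, validateLoopA_true rest]
    · by_cases h2 : e = "FINISH_SESSION" <;>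
        by_cases h3 : e = "UPDATE" <;>
          simp [validateLoopA, h1, h2, h3]
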